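-- pv_equiv track=rewrite | github.com/tusharrao198/CP_practice | competitive/contests/5th_MAY_21/1.py | check
-- ===== SOURCE A (Python) =====
-- def check(s):
--     if len(set(list(s))) == len(s):
--         return True
--     else:
--         ox = set()
--         ox.add(s[0])
--         dind = {s[0]: 0}
--         for i in range(1, len(s)):
--             if s[i] not in ox:
--                 ox.add(s[i])
--                 dind[s[i]] = i
--             elif s[i] in ox and i == dind[s[i]] + 1:
--                 dind[s[i]] = i
--             elif s[i] in ox and i != dind[s[i]] + 1:
--                 return False
--         return True
-- ===== SOURCE B (Python) =====
-- def check(s):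
--     # Run-compression: collect the first character of each maximal run,
--     # then the blocks are contiguous iff the run labels are pairwise distinct.
--     keys = []
--     for ch in s:
--         if not keys or keys[-1] != ch:
--             keys.append(ch)
--     return len(keys) == len(set(keys))
-- ===== Notes on version B (the rewrite author's own statement) =====
-- stated objective: simpler
-- what changed: Replaces A's per-index last-seen-index bookkeeping (a seen-set plus a dict of last indices with an early return) by a run-compression pass that keeps one label per maximal run followed by a uniqueness check on the labels.
import Mathlib
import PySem

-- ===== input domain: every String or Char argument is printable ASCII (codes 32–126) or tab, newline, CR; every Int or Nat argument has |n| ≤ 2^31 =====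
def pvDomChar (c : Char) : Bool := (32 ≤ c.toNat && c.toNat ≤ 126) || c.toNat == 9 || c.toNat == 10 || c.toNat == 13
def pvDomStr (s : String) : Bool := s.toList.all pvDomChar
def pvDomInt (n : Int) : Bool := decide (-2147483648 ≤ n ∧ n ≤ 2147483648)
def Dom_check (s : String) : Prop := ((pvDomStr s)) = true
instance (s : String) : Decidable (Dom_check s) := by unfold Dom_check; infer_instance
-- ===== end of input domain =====

-- B replaces A's seen-set/last-index bookkeeping with run compression + uniqueness of the run labels (simpler, same cost).

-- ===== PORT A =====
-- the for-loop over range(1, len(s)) with s[i], carrying ox (seen set) and dind (last index); false = A's early 'return False'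
def checkLoopA : List (Int × Char) → PySem.Set Char → PySem.Dict Char Int → Bool
  | [], _, _ => true
  | (i, c) :: rest, ox, dind =>
    if ¬ (PySem.Set.contains ox c = true) then
      checkLoopA rest (PySem.Set.add ox c) (PySem.Dict.insert dind c i)
    else if PySem.Set.contains ox c = true ∧ i = PySem.Dict.getD dind c 0 + 1 then
      -- dind[s[i]] is present here since s[i] ∈ ox, so getD's default is never used
      checkLoopA rest ox (PySem.Dict.insert dind c i)
    else if PySem.Set.contains ox c = true ∧ i ≠ PySem.Dict.getD dind c 0 + 1 then
      false
    else
      checkLoopA rest ox dind  -- unreachable fall-through of the elif chain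

def check (s : String) : Bool :=
  let l := s.toList
  if PySem.Set.len (PySem.Set.ofList l) = PySem.Str.len s then true
  else
    match l with
    | [] => true  -- unreachable: a string with a duplicate character is nonempty, so s[0] exists
    | c0 :: rest =>
      checkLoopA (PySem.List.enumerate rest 1)
        (PySem.Set.add PySem.Set.empty c0)
        (PySem.Dict.insert PySem.Dict.empty c0 0)

-- ===== PORT B =====
-- the run-compression loop of Source B: append ch when keys is empty or its last element differs
def altLoop : List Char → List Char → List Char
  | keys, [] => keys
  | keys, ch :: rest =>
    altLoop (if keys = [] ∨ keys.getLast? ≠ some ch then keys ++ [ch] else keys) rest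

def check_alt (s : String) : Bool :=
  let keys := altLoop [] s.toList
  decide ((keys.length : Int) = PySem.Set.len (PySem.Set.ofList keys))

-- ===== PRECONDITION & SPEC =====
def Spec_check (s : String) (out : Bool) : Prop := out = check_alt s
instance (s : String) (out : Bool) : Decidable (Spec_check s out) := by unfold Spec_check; infer_instance

-- ===== CLAIM (what is proved, stated in full; the proofs are below) =====
def Claim_equal_check : Prop := ∀ (s : String), Dom_check s → Spec_check s (check s)

-- ===== LEMMAS AND PROOFS =====

-- run labels of l continuing a run of prev?, head-first recursion (proof-side normal form of both loops)
def goOpt : Option Char → List Char → List Char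
  | _, [] => []
  | prev, c :: t => if prev = some c then goOpt prev t else c :: goOpt (some c) t

theorem altLoop_eq (l : List Char) : ∀ keys : List Char,
    altLoop keys l = keys ++ goOpt keys.getLast? l := by
  induction l with
  | nil => intro keys; simp [altLoop, goOpt]
  | cons c t ih =>
    intro keys
    by_cases h : keys.getLast? = some c
    · have hne : keys ≠ [] := by intro hk; simp [hk] at h
      simp [altLoop, goOpt, h, hne, ih]
    · have hcond : (keys = [] ∨ keys.getLast? ≠ some c) := Or.inr h
      simp only [altLoop, if_pos hcond, ih, goOpt, if_neg h]
      simp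

theorem goOpt_sublist (l : List Char) : ∀ prev, List.Sublist (goOpt prev l) l := by
  induction l with
  | nil => intro prev; simp [goOpt]
  | cons c t ih =>
    intro prev
    by_cases h : prev = some c
    · have h1 : List.Sublist (goOpt prev (c :: t)) t := by simpa [goOpt, h] using ih prev
      exact h1.trans (List.sublist_cons_self c t)
    · simpa [goOpt, h] using List.Sublist.cons₂ c (ih (some c))

theorem ofList_sublist (l : List Char) : List.Sublist (PySem.Set.ofList l) l := by
  induction l with
  | nil => simp [PySem.Set.ofList_nil]
  | cons c t ih =>
    rw [PySem.Set.ofList_cons]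
    refine List.Sublist.cons₂ c (List.Sublist.trans ?_ ih)
    simp only [PySem.Set.discard]
    exact List.filter_sublist

theorem set_len_iff_nodup (l : List Char) :
    (PySem.Set.len (PySem.Set.ofList l) = (l.length : Int)) ↔ l.Nodup := by
  constructor
  · intro h
    have hlen : (PySem.Set.ofList l).length = l.length := by
      simp only [PySem.Set.len] at h
      exact_mod_cast h
    rw [← (ofList_sublist l).eq_of_length hlen]
    exact PySem.Set.nodup_ofList l
  · intro h
    simp [PySem.Set.len, PySem.Set.ofList_eq_self_of_nodup l h]

-- A's loop, under the invariant on ox/dind, decides exactly uniqueness/freshness of the run labels of the rest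
theorem checkLoopA_eq (rest : List Char) :
    ∀ (h : Char) (tl : List Char) (ox : PySem.Set Char) (dind : PySem.Dict Char Int),
    (∀ c, PySem.Set.contains ox c = true ↔ c ∈ h :: tl) →
    (∀ c, c ∈ h :: tl → PySem.Dict.getD dind c 0 ≤ ((h :: tl).length : Int) - 1 ∧
        (PySem.Dict.getD dind c 0 = ((h :: tl).length : Int) - 1 ↔ c = h)) →
    (checkLoopA (PySem.List.enumerate rest ((h :: tl).length : Int)) ox dind = true ↔
      ((goOpt (some h) rest).Nodup ∧ ∀ d ∈ goOpt (some h) rest, d ∉ h :: tl)) := by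
  induction rest with
  | nil => intro h tl ox dind _ _; simp [PySem.List.enumerate_nil, checkLoopA, goOpt]
  | cons c rest ih =>
    intro h tl ox dind hox hdind
    rw [PySem.List.enumerate_cons]
    set k : Int := ((h :: tl).length : Int) with hk
    by_cases hmem : c ∈ h :: tl
    · have hcont : PySem.Set.contains ox c = true := (hox c).mpr hmem
      by_cases hch : c = h
      · -- adjacent repetition: dind[c] = k - 1, branch 2 fires
        subst hch
        have hval : PySem.Dict.getD dind c 0 = k - 1 := (hdind c hmem).2.mpr rfl
        have hcond : k = PySem.Dict.getD dind c 0 + 1 := by omega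
        rw [checkLoopA, if_neg (by exact not_not_intro hcont), if_pos ⟨hcont, hcond⟩]
        have hkk : ((c :: c :: tl).length : Int) = k + 1 := by
          simp only [List.length_cons, hk]; push_cast; ring
        have ihx := ih c (c :: tl) ox (PySem.Dict.insert dind c k) ?_ ?_
        · rw [hkk] at ihx
          rw [ihx]
          have hgo : goOpt (some c) (c :: rest) = goOpt (some c) rest := by
            simp [goOpt]
          rw [hgo]
          constructor
          · rintro ⟨h1, h2⟩
            refine ⟨h1, fun d hd => ?_⟩
            have := h2 d hd
            simp only [List.mem_cons] at this ⊢
            tauto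
          · rintro ⟨h1, h2⟩
            refine ⟨h1, fun d hd => ?_⟩
            have := h2 d hd
            simp only [List.mem_cons] at this ⊢
            tauto
        · intro d
          rw [hox d]
          simp only [List.mem_cons]
          tauto
        · intro d hd
          rw [hkk]
          by_cases hdc : d = c
          · subst hdc
            rw [PySem.Dict.getD_insert_self]
            constructor
            · omega
            · simp
          · rw [PySem.Dict.getD_insert, if_neg hdc]
            have hd' : d ∈ c :: tl := by
              simp only [List.mem_cons] at hd
              simp only [List.mem_cons]
              tauto
            have h1 := hdind d hd'
            constructor
            · omega
            · constructor
              · intro hv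
                exact absurd (h1.2.mp (by omega)) hdc
              · intro hv; exact absurd hv hdc
      · -- non-adjacent repetition: branch 3 fires, A returns False; RHS fails at label c
        have hval := hdind c hmem
        have hne : k ≠ PySem.Dict.getD dind c 0 + 1 := by
          intro hcontra
          exact hch (hval.2.mp (by omega))
        rw [checkLoopA, if_neg (by exact not_not_intro hcont),
          if_neg (by rintro ⟨_, hx⟩; exact hne hx), if_pos ⟨hcont, fun hx => hne hx⟩]
        simp only [Bool.false_eq_true, false_iff, not_and]
        intro _ h2
        have hcg : c ∈ goOpt (some h) (c :: rest) := by
          have : ¬ (some h = some c) := by simpa using fun hx => hch hx.symm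
          simp [goOpt, this]
        exact h2 c hcg hmem
    · -- new character: branch 1 fires, c becomes the new head of the seen prefix
      have hcont : PySem.Set.contains ox c = false := by
        by_contra hx
        simp only [Bool.not_eq_false] at hx
        exact hmem ((hox c).mp hx)
      rw [checkLoopA, if_pos (by rw [hcont]; simp)]
      have hkk : ((c :: h :: tl).length : Int) = k + 1 := by
        simp only [List.length_cons, hk]; push_cast; ring
      have hch : c ≠ h := fun hx => hmem (hx ▸ List.mem_cons_self)
      have ihx := ih c (h :: tl) (PySem.Set.add ox c) (PySem.Dict.insert dind c k) ?_ ?_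
      · rw [hkk] at ihx
        rw [ihx]
        have hgo : goOpt (some h) (c :: rest) = c :: goOpt (some c) rest := by
          have : ¬ (some h = some c) := by simpa using fun hx => hch hx.symm
          rw [goOpt, if_neg this]
        rw [hgo]
        constructor
        · rintro ⟨h1, h2⟩
          have hcg : c ∉ goOpt (some c) rest := by
            intro hcg
            exact (h2 c hcg) List.mem_cons_self
          refine ⟨List.nodup_cons.mpr ⟨hcg, h1⟩, ?_⟩
          intro d hd
          rcases List.mem_cons.mp hd with rfl | hd'
          · exact hmem
          · have := h2 d hd'
            simp only [List.mem_cons] at this ⊢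
            tauto
        · rintro ⟨h1, h2⟩
          obtain ⟨hcg, h1'⟩ := List.nodup_cons.mp h1
          refine ⟨h1', fun d hd => ?_⟩
          have hd2 := h2 d (List.mem_cons_of_mem c hd)
          have hdc : d ≠ c := fun hx => hcg (hx ▸ hd)
          simp only [List.mem_cons] at hd2 ⊢
          tauto
      · intro d
        rw [PySem.Set.contains_iff, PySem.Set.mem_add, ← PySem.Set.contains_iff, hox d]
        simp only [List.mem_cons]
        tauto
      · intro d hd
        rw [hkk]
        by_cases hdc : d = c
        · subst hdc
          rw [PySem.Dict.getD_insert_self]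
          constructor
          · omega
          · simp
        · rw [PySem.Dict.getD_insert, if_neg hdc]
          have hd' : d ∈ h :: tl := by
            simp only [List.mem_cons] at hd ⊢
            tauto
          have h1 := hdind d hd'
          constructor
          · omega
          · constructor
            · intro hv; omega
            · intro hv; exact absurd hv hdc

-- ===== VERDICT (by name: the statement is the Claim_ definition above) =====
theorem check_spec : Claim_equal_check := by
  intro s _
  unfold Spec_check
  rw [Bool.eq_iff_iff]
  simp only [check, check_alt]
  rw [altLoop_eq]
  simp only [List.getLast?_nil, List.nil_append]
  by_cases hnd : s.toList.Nodup
  · have hcond : PySem.Set.len (PySem.Set.ofList s.toList) = PySem.Str.len s := by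
      rw [PySem.Str.len_eq]
      exact (set_len_iff_nodup _).mpr hnd
    rw [if_pos hcond]
    have hkeys : (goOpt none s.toList).Nodup := hnd.sublist (goOpt_sublist _ none)
    simp only [decide_eq_true_iff]
    constructor
    · intro _
      exact ((set_len_iff_nodup _).mpr hkeys).symm
    · intro _; trivial
  · have hcond : ¬ (PySem.Set.len (PySem.Set.ofList s.toList) = PySem.Str.len s) := by
      rw [PySem.Str.len_eq]
      exact fun h => hnd ((set_len_iff_nodup _).mp h)
    rw [if_neg hcond]
    rcases hl : s.toList with _ | ⟨c0, rest⟩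
    · exact absurd (hl ▸ List.nodup_nil) hnd
    · simp only [hl]
      have hmain := checkLoopA_eq rest c0 [] (PySem.Set.add PySem.Set.empty c0)
        (PySem.Dict.insert PySem.Dict.empty c0 0) ?_ ?_
      · simp only [List.length_cons, List.length_nil] at hmain
        norm_num at hmain
        rw [show (PySem.Set.add PySem.Set.empty c0 : PySem.Set Char) = [c0] from rfl, hmain]
        have hgo : goOpt none (c0 :: rest) = c0 :: goOpt (some c0) rest := by
          rw [goOpt, if_neg (by simp)]
        simp only [hgo, decide_eq_true_iff]
        rw [eq_comm, set_len_iff_nodup, List.nodup_cons]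
        constructor
        · rintro ⟨h1, h2⟩
          exact ⟨fun hc => h2 c0 hc rfl, h1⟩
        · rintro ⟨h1, h2⟩
          exact ⟨h2, fun d hd he => h1 (he ▸ hd)⟩
      · intro d
        rw [PySem.Set.contains_iff, PySem.Set.mem_add]
        simp [PySem.Set.empty]
      · intro d hd
        simp only [List.mem_cons, List.not_mem_nil, or_false] at hd
        subst hd
        rw [PySem.Dict.getD_insert_self]
        norm_num
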